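-- pv_equiv track=rewrite | github.com/tghanchidnx/Databridge_AI | libs/databridge-discovery/src/databridge_discovery/workflows/incremental_sync.py | _records_differ
-- ===== SOURCE A (Python) =====
-- from typing import Any
--
-- def _records_differ(
--
--     record1: dict[str, Any],
--     record2: dict[str, Any],
--     exclude_columns: list[str],
-- ) -> bool:
--     """Check if two records differ (excluding key columns)."""
--     for key, value in record1.items():
--         if key in exclude_columns:
--             continue
--         if key in record2 and record2[key] != value:
--             return True
--     return False
-- ===== SOURCE B (Python) =====
-- def _records_differ(
--     record1,
--     record2,
--     exclude_columns,
-- ) -> bool: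
--     """Check if two records differ (excluding key columns)."""
--     excluded = set(exclude_columns)
--     keep = [k for k in record1 if k not in excluded and k in record2]
--     d1 = {k: record1[k] for k in keep}
--     d2 = {k: record2[k] for k in keep}
--     return d1 != d2
-- ===== Notes on version B (the rewrite author's own statement) =====
-- stated objective: simpler
-- what changed: Replaces the short-circuit membership loop by building two projected dicts over the common non-excluded keys (with exclude_columns hoisted into a set) and returning a single dict inequality test.
import Mathlib
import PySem

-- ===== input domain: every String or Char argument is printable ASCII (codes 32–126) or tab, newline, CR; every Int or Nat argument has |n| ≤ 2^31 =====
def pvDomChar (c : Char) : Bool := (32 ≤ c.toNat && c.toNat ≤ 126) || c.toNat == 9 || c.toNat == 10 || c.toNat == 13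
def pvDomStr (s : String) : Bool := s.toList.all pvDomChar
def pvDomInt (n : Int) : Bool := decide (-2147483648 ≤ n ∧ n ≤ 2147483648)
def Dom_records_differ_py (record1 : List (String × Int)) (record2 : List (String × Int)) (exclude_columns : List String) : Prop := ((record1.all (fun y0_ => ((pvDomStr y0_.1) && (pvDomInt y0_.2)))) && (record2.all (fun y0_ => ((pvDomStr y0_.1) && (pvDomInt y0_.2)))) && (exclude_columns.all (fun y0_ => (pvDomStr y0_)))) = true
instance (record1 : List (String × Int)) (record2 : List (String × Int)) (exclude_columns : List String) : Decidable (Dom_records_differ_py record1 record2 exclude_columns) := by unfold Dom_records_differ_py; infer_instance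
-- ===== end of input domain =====

-- B replaces A's short-circuit membership loop by building two projected dicts over the
-- common non-excluded keys and comparing them once (objective: simpler decomposition).

-- ===== PORT A =====
-- 'for key, value in record1.items(): …' with early return
def pvALoop (items : List (String × Int)) (d2 : PySem.Dict String Int) (exclude_columns : List String) : Bool :=
  match items with
  | [] => false
  | (k, v) :: rest =>
    if exclude_columns.contains k then pvALoop rest d2 exclude_columns
    else
      match d2.get? k with
      | some w => if w != v then true else pvALoop rest d2 exclude_columns
      | none => pvALoop rest d2 exclude_columns

def records_differ_py (record1 : List (String × Int)) (record2 : List (String × Int)) (exclude_columns : List String) : Bool :=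
  pvALoop (PySem.Dict.ofList record1).items (PySem.Dict.ofList record2) exclude_columns

-- ===== PORT B =====
def records_differ_py_alt (record1 : List (String × Int)) (record2 : List (String × Int)) (exclude_columns : List String) : Bool :=
  let d1 := PySem.Dict.ofList record1
  let d2 := PySem.Dict.ofList record2
  let excluded := PySem.Set.ofList exclude_columns
  let keep := d1.keys.filter (fun k => !excluded.contains k && d2.contains k)
  -- record1[k] / record2[k]: k is a key of both dicts here, so the getD default 0 is unreachable
  let p1 := keep.foldl (fun d k => d.insert k (d1.getD k 0)) (PySem.Dict.empty : PySem.Dict String Int)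
  let p2 := keep.foldl (fun d k => d.insert k (d2.getD k 0)) (PySem.Dict.empty : PySem.Dict String Int)
  decide (p1 ≠ p2)

-- ===== PRECONDITION & SPEC =====
def Spec_records_differ_py (record1 : List (String × Int)) (record2 : List (String × Int)) (exclude_columns : List String) (out : Bool) : Prop := out = records_differ_py_alt record1 record2 exclude_columns
instance (record1 : List (String × Int)) (record2 : List (String × Int)) (exclude_columns : List String) (out : Bool) : Decidable (Spec_records_differ_py record1 record2 exclude_columns out) := by unfold Spec_records_differ_py; infer_instance

-- ===== CLAIM (what is proved, stated in full; the proofs are below) =====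
def Claim_equal_records_differ_py : Prop := ∀ (record1 : List (String × Int)) (record2 : List (String × Int)) (exclude_columns : List String), Dom_records_differ_py record1 record2 exclude_columns → Spec_records_differ_py record1 record2 exclude_columns (records_differ_py record1 record2 exclude_columns)

-- ===== LEMMAS AND PROOFS =====

-- dicts with equal items lists are equal
lemma pvDict_eq_of_items_eq {p1 p2 : PySem.Dict String Int} (h : p1.items = p2.items) : p1 = p2 := by
  cases p1; cases p2; simpa [PySem.Dict.items] using h

-- A's loop is an 'any' over the items list
lemma pvALoop_eq_any (items : List (String × Int)) (d2 : PySem.Dict String Int) (ex : List String) :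
    pvALoop items d2 ex
      = items.any (fun p => !ex.contains p.1 &&
          (match d2.get? p.1 with | some w => w != p.2 | none => false)) := by
  induction items with
  | nil => rfl
  | cons p rest ih =>
    obtain ⟨k, v⟩ := p
    simp only [pvALoop, List.any_cons, ih]
    by_cases hex : k ∈ ex
    · simp [hex]
    · cases h2 : d2.get? k with
      | none => simp [hex]
      | some w =>
        by_cases hw : w = v
        · simp [hex, hw]
        · simp [hex, hw]

-- folding insert over fresh, nodup keys appends the pairs in order
lemma foldl_insert_items (keep : List String) (f : String → Int) (d : PySem.Dict String Int)
    (hnd : keep.Nodup) (hfresh : ∀ k ∈ keep, d.contains k = false) :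
    (keep.foldl (fun d k => d.insert k (f k)) d).items
      = d.items ++ keep.map (fun k => (k, f k)) := by
  induction keep generalizing d with
  | nil => simp
  | cons k rest ih =>
    have hfr : ∀ k' ∈ rest, (d.insert k (f k)).contains k' = false := by
      intro k' hk'
      rw [PySem.Dict.contains_insert]
      have hne : k' ≠ k := by
        rintro rfl; exact (List.nodup_cons.mp hnd).1 hk'
      simp [hne, hfresh k' (List.mem_cons_of_mem _ hk')]
    rw [List.foldl_cons, ih (d.insert k (f k)) hnd.of_cons hfr,
        PySem.Dict.items_insert_of_not_contains d (f k) (hfresh k (List.mem_cons_self ..))]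
    simp

theorem records_differ_py_spec_aux (record1 record2 : List (String × Int)) (ex : List String) :
    records_differ_py record1 record2 ex = records_differ_py_alt record1 record2 ex := by
  unfold records_differ_py records_differ_py_alt
  dsimp only
  set d1 := PySem.Dict.ofList record1 with hd1
  set d2 := PySem.Dict.ofList record2 with hd2
  have hnd1 : d1.keys.Nodup := PySem.Dict.nodup_keys_ofList record1
  have hsetmem : ∀ k : String, (PySem.Set.ofList ex).contains k = ex.contains k := by
    intro k
    simp [List.contains_iff_mem, PySem.Set.mem_ofList]
  have hfiltereq : d1.keys.filter (fun k => !(PySem.Set.ofList ex).contains k && d2.contains k)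
      = d1.keys.filter (fun k => !ex.contains k && d2.contains k) := by
    apply List.filter_congr
    intro k _
    rw [hsetmem]
  rw [hfiltereq]
  set keep := d1.keys.filter (fun k => !ex.contains k && d2.contains k) with hkeep
  have hknd : keep.Nodup := hnd1.filter _
  rw [pvALoop_eq_any]
  have h1 := foldl_insert_items keep (fun k => d1.getD k 0) PySem.Dict.empty hknd
      (by intro k _; exact PySem.Dict.contains_empty k)
  have h2 := foldl_insert_items keep (fun k => d2.getD k 0) PySem.Dict.empty hknd
      (by intro k _; exact PySem.Dict.contains_empty k)
  -- both sides decide the same proposition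
  rw [Bool.eq_iff_iff]
  simp only [List.any_eq_true, decide_eq_true_eq]
  constructor
  · rintro ⟨⟨k, v⟩, hmem, hpred⟩
    simp only [Bool.and_eq_true, Bool.not_eq_true'] at hpred
    obtain ⟨hex, hmatch⟩ := hpred
    cases hg2 : d2.get? k with
    | none => rw [hg2] at hmatch; simp at hmatch
    | some w =>
      rw [hg2] at hmatch
      have hwv : w ≠ v := by simpa using hmatch
      have hkkeep : k ∈ keep := by
        rw [hkeep]
        refine List.mem_filter.mpr ⟨PySem.Dict.mem_keys_of_mem_items d1 hmem, ?_⟩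
        have hc2 : d2.contains k = true := by
          rw [PySem.Dict.contains_eq_isSome_get? d2 k, hg2]; rfl
        simp only [hc2, Bool.and_true, Bool.not_eq_eq_eq_not, Bool.not_true]
        simpa using hex
      intro heq
      have := congrArg PySem.Dict.items heq
      rw [h1, h2] at this
      simp at this
      have hkv := this k hkkeep
      rw [PySem.Dict.getD_of_mem_items d1 hmem hnd1 0,
          PySem.Dict.getD_of_get?_eq_some d2 0 hg2] at hkv
      exact hwv hkv.symm
  · intro hne
    by_contra hall
    push Not at hall
    apply hne
    have hveq : ∀ x ∈ keep, (x, d1.getD x 0) = (x, d2.getD x 0) := by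
      intro x hx
      have hxf := List.mem_filter.mp (hkeep ▸ hx)
      obtain ⟨hxkeys, hcond⟩ := hxf
      simp only [Bool.and_eq_true, Bool.not_eq_true'] at hcond
      obtain ⟨hex, hc2⟩ := hcond
      -- x is a key of d1: get some value v
      cases hg1 : d1.get? x with
      | none => exact absurd ((PySem.Dict.get?_eq_none_iff_not_mem_keys d1 x).mp hg1) (by simpa using hxkeys)
      | some v =>
        cases hg2 : d2.get? x with
        | none =>
          rw [PySem.Dict.contains_eq_isSome_get? d2 x, hg2] at hc2; simp at hc2
        | some w =>
          have hmem1 : (x, v) ∈ d1.items := PySem.Dict.mem_items_of_get?_eq_some d1 hg1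
          have := hall ⟨x, v⟩ hmem1
          rw [hex] at this
          simp at this
          rw [hg2] at this
          have hwv : w = v := by simpa using this
          rw [PySem.Dict.getD_of_get?_eq_some d1 0 hg1, PySem.Dict.getD_of_get?_eq_some d2 0 hg2, hwv]
    -- p1 = p2 since their items lists are equal
    have : (keep.foldl (fun d k => d.insert k (d1.getD k 0)) PySem.Dict.empty).items
         = (keep.foldl (fun d k => d.insert k (d2.getD k 0)) PySem.Dict.empty).items := by
      rw [h1, h2]
      exact congrArg _ (List.map_congr_left hveq)
    exact pvDict_eq_of_items_eq this

-- ===== VERDICT (by name: the statement is the Claim_ definition above) =====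
theorem records_differ_py_spec : Claim_equal_records_differ_py := by
  intro r1 r2 ex _
  exact records_differ_py_spec_aux r1 r2 ex
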